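-- pv_equiv track=rewrite | github.com/diwert-ai/Problems | Problems/HSE_DPO_DS/DPO_Algo_2023/num_zeroes.py | num_zeroes
-- ===== SOURCE A (Python) =====
-- def num_zeroes(array, queries):
--     n = len(array)
--     zeros_count = [0] * n
--     count = 0
--     result = [0] * len(queries)
--     for i in range(n):
--         if not array[i]:
--             count += 1
--         zeros_count[i] = count
--
--     for k, (i, j) in enumerate(queries):
--         result[k] = zeros_count[j] - zeros_count[i] + (1 if not array[i] else 0)
--
--     return result
-- ===== SOURCE B (Python) =====
-- def num_zeroes(array, queries):
--     result = []
--     for i, j in queries: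
--         count = 0
--         for idx in range(i, j + 1):
--             if not array[idx]:
--                 count += 1
--         result.append(count)
--     return result
-- ===== Notes on version B (the rewrite author's own statement) =====
-- stated objective: simpler
-- what changed: B drops A's precomputed prefix-sum array of zero counts and instead counts zeros directly per query with a plain range loop, appending each count.
-- outside the precondition, e.g. on num_zeroes([0, 1], [(-1, 1)]): A returns [0], B returns [1]; on num_zeroes([7, 0, 7], [(2, 0)]): A returns [-1], B returns [0]
import Mathlib
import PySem

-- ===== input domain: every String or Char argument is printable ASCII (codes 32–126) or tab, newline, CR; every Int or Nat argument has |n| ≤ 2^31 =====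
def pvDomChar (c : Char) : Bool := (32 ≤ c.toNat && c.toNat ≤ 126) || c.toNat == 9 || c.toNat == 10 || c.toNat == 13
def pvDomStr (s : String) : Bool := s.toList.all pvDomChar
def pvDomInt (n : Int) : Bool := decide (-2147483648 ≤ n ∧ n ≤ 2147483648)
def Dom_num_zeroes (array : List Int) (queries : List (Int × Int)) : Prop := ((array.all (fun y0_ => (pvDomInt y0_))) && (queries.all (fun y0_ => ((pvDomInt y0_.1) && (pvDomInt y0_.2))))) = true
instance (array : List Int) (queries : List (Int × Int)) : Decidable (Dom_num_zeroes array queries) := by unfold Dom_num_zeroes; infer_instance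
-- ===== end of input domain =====

-- B replaces A's precomputed prefix-sum array by a direct per-query count loop (simpler; not faster).

-- ===== PORT A =====
def num_zeroes (array : List Int) (queries : List (Int × Int)) : List Int :=
  -- n = len(array); build zeros_count (prefix counts) with a running count, then answer each query
  let n : Int := array.length
  let zc :=
    (PySem.List.pyRange 0 n 1).foldl
      (fun (acc : List Int × Int) i =>
        let count := if PySem.List.pyGetD array i 0 = 0 then acc.2 + 1 else acc.2
        (acc.1 ++ [count], count))
      ([], 0)
  let zeros_count := zc.1
  queries.map (fun q =>
    PySem.List.pyGetD zeros_count q.2 0 - PySem.List.pyGetD zeros_count q.1 0 +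
      (if PySem.List.pyGetD array q.1 0 = 0 then 1 else 0))

-- ===== PORT B =====
def num_zeroes_alt (array : List Int) (queries : List (Int × Int)) : List Int :=
  queries.foldl
    (fun result q =>
      result ++
        [(PySem.List.pyRange q.1 (q.2 + 1) 1).foldl
           (fun count idx => if PySem.List.pyGetD array idx 0 = 0 then count + 1 else count) 0])
    []

-- ===== PRECONDITION & SPEC =====
-- Pre_ excludes queries with an out-of-range endpoint, on which A raises IndexError, and — only
-- when the array actually contains a zero — the malformed reversed (i > j) or sign-mixed (one
-- endpoint negative, the other not) queries, on which A's prefix-difference arithmetic and B's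
-- direct range count each give an accidental value that no specification of "count zeros in the
-- range i..j" would fix either way.  Queries with both endpoints negative (consistent Python
-- wraparound), and ALL in-range queries over a zero-free array, stay inside and are proved equal.
def Pre_num_zeroes (array : List Int) (queries : List (Int × Int)) : Prop :=
  ∀ q ∈ queries,
    (-(array.length : Int) ≤ q.1 ∧ q.1 < (array.length : Int) ∧
     -(array.length : Int) ≤ q.2 ∧ q.2 < (array.length : Int)) ∧
    ((0 : Int) ∉ array ∨
      (q.1 ≤ q.2 ∧ ((0 ≤ q.1 ∧ 0 ≤ q.2) ∨ (q.1 < 0 ∧ q.2 < 0))))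
instance (array : List Int) (queries : List (Int × Int)) : Decidable (Pre_num_zeroes array queries) := by unfold Pre_num_zeroes; infer_instance

def pvWitness_num_zeroes : List Int × (List (Int × Int)) := ([1, 0, 2], [(0, 2), (1, 1)])

def Spec_num_zeroes (array : List Int) (queries : List (Int × Int)) (out : List Int) : Prop := out = num_zeroes_alt array queries
instance (array : List Int) (queries : List (Int × Int)) (out : List Int) : Decidable (Spec_num_zeroes array queries out) := by unfold Spec_num_zeroes; infer_instance

-- ===== CLAIM (what is proved, stated in full; the proofs are below) =====
def Claim_equal_num_zeroes : Prop := ∀ (array : List Int) (queries : List (Int × Int)), Dom_num_zeroes array queries → Pre_num_zeroes array queries → Spec_num_zeroes array queries (num_zeroes array queries)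

-- ===== LEMMAS AND PROOFS =====

-- number of zeros among the first t elements of array
def zcnt (array : List Int) (t : Nat) : Int := ((array.take t).countP (fun x => decide (x = 0)) : Int)

theorem zcnt_succ (array : List Int) (m : Nat) (hm : m < array.length) :
    zcnt array (m + 1) = zcnt array m + (if array[m] = 0 then 1 else 0) := by
  have h : array.take (m + 1) = array.take m ++ [array[m]] := by
    rw [List.take_add_one, List.getElem?_eq_getElem hm]; rfl
  rw [zcnt, zcnt, h, List.countP_append, List.countP_cons]
  split_ifs <;> simp_all

theorem pyGetD_nat (array : List Int) (m : Nat) (hm : m < array.length) :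
    PySem.List.pyGetD array ((m : Nat) : Int) 0 = array[m] := by
  rw [PySem.List.pyGetD_natCast]
  exact List.getD_eq_getElem _ _ hm

theorem zeros_count_eq (array : List Int) (m : Nat) (hm : m ≤ array.length) :
    (PySem.List.pyRange 0 (m : Int) 1).foldl
      (fun (acc : List Int × Int) i =>
        (acc.1 ++ [if PySem.List.pyGetD array i 0 = 0 then acc.2 + 1 else acc.2],
         if PySem.List.pyGetD array i 0 = 0 then acc.2 + 1 else acc.2))
      ([], 0)
    = ((List.range m).map (fun k => zcnt array (k + 1)), zcnt array m) := by
  induction m with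
  | zero => simp [zcnt, PySem.List.pyRange_one_eq_nil]
  | succ m ih =>
      have hm' : m ≤ array.length := Nat.le_of_succ_le hm
      have hlt : m < array.length := hm
      have hcast : ((m + 1 : Nat) : Int) = (m : Int) + 1 := by push_cast; ring
      rw [hcast, PySem.List.pyRange_one_succ_right (by exact_mod_cast Nat.zero_le m),
        List.foldl_append, ih hm', List.range_succ, List.map_append]
      simp only [List.foldl_cons, List.foldl_nil, List.map_cons, List.map_nil]
      rw [pyGetD_nat array m hlt, zcnt_succ array m hlt]
      split_ifs <;> simp_all

theorem count_range_eq (array : List Int) (a b : Nat) (hab : a ≤ b) (hb : b ≤ array.length) :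
    (PySem.List.pyRange (a : Int) (b : Int) 1).foldl
      (fun count idx => if PySem.List.pyGetD array idx 0 = 0 then count + 1 else count) 0
    = zcnt array b - zcnt array a := by
  induction b, hab using Nat.le_induction with
  | base => simp [PySem.List.pyRange_one_eq_nil]
  | succ b hab ih =>
      have hb' : b ≤ array.length := Nat.le_of_succ_le hb
      have hlt : b < array.length := hb
      have hcast : ((b + 1 : Nat) : Int) = (b : Int) + 1 := by omega
      rw [hcast, PySem.List.pyRange_one_succ_right (by exact_mod_cast hab), List.foldl_append,
        ih hb']
      simp only [List.foldl_cons, List.foldl_nil]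
      rw [pyGetD_nat array b hlt, zcnt_succ array b hlt]
      split_ifs <;> ring

theorem count_range_eq_neg (array : List Int) (a b : Nat) (hab : a ≤ b) (hb : b ≤ array.length) :
    (PySem.List.pyRange ((a : Int) - (array.length : Int)) ((b : Int) - (array.length : Int)) 1).foldl
      (fun count idx => if PySem.List.pyGetD array idx 0 = 0 then count + 1 else count) 0
    = zcnt array b - zcnt array a := by
  induction b, hab using Nat.le_induction with
  | base => simp [PySem.List.pyRange_one_eq_nil]
  | succ b hab ih =>
      have hb' : b ≤ array.length := Nat.le_of_succ_le hb
      have hlt : b < array.length := hb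
      have hcast : ((b + 1 : Nat) : Int) - (array.length : Int)
          = ((b : Int) - (array.length : Int)) + 1 := by omega
      rw [hcast, PySem.List.pyRange_one_succ_right (by omega), List.foldl_append,
        ih hb']
      simp only [List.foldl_cons, List.foldl_nil]
      have hk : (b : Int) - (array.length : Int) = -(((array.length - b : Nat) : Nat) : Int) := by
        omega
      have hget : PySem.List.pyGetD array ((b : Int) - (array.length : Int)) 0 = array[b]'hlt := by
        rw [hk, PySem.List.pyGetD_neg_natCast array _ 0 (by omega) (by omega)]
        congr 1
        omega
      rw [hget, zcnt_succ array b hlt]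
      split_ifs <;> ring

theorem foldl_count_of_none {α : Type} (Q : α → Prop) [DecidablePred Q] (l : List α)
    (init : Int) (h : ∀ x ∈ l, ¬ Q x) :
    l.foldl (fun count x => if Q x then count + 1 else count) init = init := by
  induction l generalizing init with
  | nil => rfl
  | cons y l ih =>
      simp only [List.foldl_cons]
      rw [if_neg (h y (List.mem_cons_self))]
      exact ih init (fun x hx => h x (List.mem_cons_of_mem y hx))

-- ===== VERDICT (by name: the statement is the Claim_ definition above) =====
theorem num_zeroes_spec : Claim_equal_num_zeroes := by
  intro array queries _ hpre
  unfold Spec_num_zeroes num_zeroes num_zeroes_alt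
  dsimp only
  rw [PySem.List.foldl_append_singleton_eq_map]
  rw [show ((array.length : Int)) = ((array.length : Nat) : Int) from rfl]
  rw [zeros_count_eq array array.length le_rfl]
  rw [List.nil_append]
  refine List.map_congr_left ?_
  intro q hq
  obtain ⟨⟨hr1, hr2, hr3, hr4⟩, hrest⟩ := hpre q hq
  rcases hrest with hnozero | ⟨hij, hsign⟩
  · -- the array has no zero at all: both sides are 0
    have hz : ∀ (t : Int), -(array.length : Int) ≤ t → t < (array.length : Int) →
        PySem.List.pyGetD array t 0 ≠ 0 := by
      intro t ht1 ht2 h0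
      have hm := PySem.List.pyGetD_mem array 0 (i := t) (by simp [PySem.Raise.InRange]; omega)
      rw [h0] at hm
      exact hnozero hm
    have hzc0 : ∀ (t : Int), -(array.length : Int) ≤ t → t < (array.length : Int) →
        PySem.List.pyGetD ((List.range array.length).map (fun k => zcnt array (k + 1))) t 0 = 0 := by
      intro t ht1 ht2
      have hm := PySem.List.pyGetD_mem
        ((List.range array.length).map (fun k => zcnt array (k + 1))) 0 (i := t)
        (by simp [PySem.Raise.InRange]; omega)
      obtain ⟨k, -, hk⟩ := List.mem_map.mp hm
      rw [← hk, zcnt]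
      simp only [Int.natCast_eq_zero]
      rw [List.countP_eq_zero]
      intro x hx
      simp only [decide_eq_true_eq]
      intro h0
      exact hnozero (h0 ▸ List.mem_of_mem_take hx)
    rw [hzc0 q.2 hr3 hr4, hzc0 q.1 hr1 hr2,
      if_neg (hz q.1 hr1 hr2),
      foldl_count_of_none (fun idx => PySem.List.pyGetD array idx 0 = 0) _ 0 ?_]
    · ring
    · intro idx hidx
      have := PySem.List.mem_pyRange_one.mp hidx
      exact hz idx (by omega) (by omega)
  · have hZlen : ((List.range array.length).map (fun k => zcnt array (k + 1))).length
        = array.length := by simp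
    have hZget : ∀ (m : Nat) (hm : m < array.length),
        ((List.range array.length).map (fun k => zcnt array (k + 1)))[m]'(by omega)
          = zcnt array (m + 1) := by
      intro m hm
      simp
    rcases hsign with ⟨h0, -⟩ | ⟨-, hj0⟩
    · -- non-negative indices
      have hjn : q.2 < (array.length : Int) := hr4
      have h0j : 0 ≤ q.2 := le_trans h0 hij
      have hia : q.1 = ((q.1.toNat : Nat) : Int) := (Int.toNat_of_nonneg h0).symm
      have hja : q.2 = ((q.2.toNat : Nat) : Int) := (Int.toNat_of_nonneg h0j).symm
      have hilen : q.1.toNat < array.length := by omega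
      have hjlen : q.2.toNat < array.length := by omega
      have hzc : ∀ (k : Nat), k < array.length →
          PySem.List.pyGetD ((List.range array.length).map (fun k => zcnt array (k + 1))) ((k : Nat) : Int) 0
            = zcnt array (k + 1) := by
        intro k hk
        rw [PySem.List.pyGetD_natCast, List.getD_eq_getElem _ _ (by simpa using hk)]
        simp
      have hji1 : q.2 + 1 = ((q.2.toNat + 1 : Nat) : Int) := by omega
      rw [hji1]
      conv_lhs => rw [hja, hia]
      conv_rhs => rw [hia]
      rw [count_range_eq array q.1.toNat (q.2.toNat + 1) (by omega) (by omega)]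
      rw [hzc q.2.toNat hjlen, hzc q.1.toNat hilen]
      rw [pyGetD_nat array q.1.toNat hilen, zcnt_succ array q.1.toNat hilen]
      split_ifs <;> ring
    · -- both endpoints negative (wraparound)
      have hin : -(array.length : Int) ≤ q.1 := hr1
      have hi0 : q.1 < 0 := by omega
      have hjn' : -(array.length : Int) ≤ q.2 := by omega
      have ha : q.1 = (((q.1 + array.length).toNat : Nat) : Int) - (array.length : Int) := by omega
      have hb : q.2 + 1 = ((((q.2 + array.length).toNat + 1 : Nat) : Nat) : Int)
          - (array.length : Int) := by omega
      have halen : (q.1 + array.length).toNat < array.length := by omega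
      have hblen : (q.2 + array.length).toNat < array.length := by omega
      have hzcneg : ∀ (t : Int), -(array.length : Int) ≤ t → t < 0 →
          PySem.List.pyGetD ((List.range array.length).map (fun k => zcnt array (k + 1))) t 0
            = zcnt array ((t + array.length).toNat + 1) := by
        intro t ht1 ht2
        have hk : t = -((((-t).toNat : Nat) : Int)) := by omega
        conv_lhs => rw [hk]
        rw [PySem.List.pyGetD_neg_natCast _ _ 0 (by omega) (by rw [hZlen]; omega)]
        simp only [List.length_map, List.length_range, List.getElem_map, List.getElem_range]
        congr 2
        omega
      have hgetneg : PySem.List.pyGetD array q.1 0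
          = array[(q.1 + array.length).toNat]'halen := by
        have hk : q.1 = -((((-q.1).toNat : Nat) : Int)) := by omega
        conv_lhs => rw [hk]
        rw [PySem.List.pyGetD_neg_natCast array _ 0 (by omega) (by omega)]
        congr 1
        omega
      conv_rhs => rw [hb, ha]
      rw [count_range_eq_neg array (q.1 + array.length).toNat ((q.2 + array.length).toNat + 1)
        (by omega) (by omega)]
      rw [hzcneg q.2 hjn' hj0, hzcneg q.1 hin hi0]
      rw [hgetneg, zcnt_succ array (q.1 + array.length).toNat halen]
      split_ifs <;> ring
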